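-- pv_equiv track=rewrite | github.com/junaedifahmi/asr | kaldi/prep/prep_lang.py | lexiconize
-- ===== SOURCE A (Python) =====
-- def lexiconize(kata):
--     x = [c for c in kata]
--     for i in range(len(x)):
--         try:
--             y = x[i+1]
--
--             if x[i] == 'n' and y == 'y':
--                 x[i] = 'ny'
--                 x[i+1] = '#'
--             elif x[i] == 'n' and y == 'g':
--                 x[i] = 'ng'
--                 x[i+1] = '#'
--             elif x[i] == 's' and y == 'y':
--                 x[i] = 'sy'
--                 x[i+1] = '#'
--             elif x[i] == 'k' and y == 'h':
--                 x[i] = 'kh'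
--                 x[i+1] = '#'
--             elif x[i] == 't' and y == 'h':
--                 x[i] = 'th'
--                 x[i+1] = '#'
--         except:
--             pass
--     x = [c for c in x if c != '#']
--
--     return ' '.join(x)
-- ===== SOURCE B (Python) =====
-- def lexiconize(kata):
--     x = list(kata)
--     table = {('n', 'y'): 'ny', ('n', 'g'): 'ng', ('s', 'y'): 'sy',
--              ('k', 'h'): 'kh', ('t', 'h'): 'th'}
--     out = []
--     i = 0
--     while i < len(x):
--         if i + 1 < len(x) and (x[i], x[i + 1]) in table:
--             out.append(table[(x[i], x[i + 1])])
--             i += 2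
--         else:
--             out.append(x[i])
--             i += 1
--     return ' '.join(out)
-- ===== Notes on version B (the rewrite author's own statement) =====
-- stated objective: simpler
-- what changed: Replaces A's mark-with-'#'-then-filter mutation pass (overwrite x[i] with the merged token, x[i+1] with a sentinel, then drop sentinels) by a single forward scan with a digraph table that appends the merged token and skips two positions.
-- intended difference: On inputs containing the character '#', A conflates it with its internal sentinel and silently deletes every '#' from the output (A('a#') = 'a'); B keeps '#' as an ordinary token (B('a#') = 'a #'), which is the intended behaviour for an input character. — e.g. on lexiconize("a#"): A returns "a", B returns "a #"
import Mathlib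
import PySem

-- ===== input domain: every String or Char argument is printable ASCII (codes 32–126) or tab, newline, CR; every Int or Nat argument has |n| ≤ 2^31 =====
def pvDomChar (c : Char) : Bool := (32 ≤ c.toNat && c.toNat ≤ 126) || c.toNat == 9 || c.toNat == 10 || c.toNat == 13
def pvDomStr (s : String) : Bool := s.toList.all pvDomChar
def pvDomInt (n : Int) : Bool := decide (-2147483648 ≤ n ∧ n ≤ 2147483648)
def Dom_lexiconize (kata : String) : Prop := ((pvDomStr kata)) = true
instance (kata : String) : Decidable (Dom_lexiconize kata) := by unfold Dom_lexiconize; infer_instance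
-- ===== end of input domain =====

-- B replaces A's sentinel-overwrite ('#') plus filtering pass by one forward scan with a
-- digraph table (simpler decomposition, same cost); equivalence is about the return value only.

-- ===== PORT A =====
-- one iteration of A's 'for i in range(len(x))' body: try/except around x[i+1] (IndexError → pass),
-- then the elif chain overwriting x[i] with the merged token and x[i+1] with the sentinel '#'
def lexBody (x : List String) (i : Nat) : List String :=
  match PySem.List.pyGet? x ((i : Int) + 1) with
  | none => x                                     -- except: pass
  | some y =>
    match PySem.List.pyGet? x (i : Int) with
    | none => x                                   -- unreachable (i < len x), inside the same try
    | some xi =>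
      if xi = "n" ∧ y = "y" then (x.set i "ny").set (i+1) "#"
      else if xi = "n" ∧ y = "g" then (x.set i "ng").set (i+1) "#"
      else if xi = "s" ∧ y = "y" then (x.set i "sy").set (i+1) "#"
      else if xi = "k" ∧ y = "h" then (x.set i "kh").set (i+1) "#"
      else if xi = "t" ∧ y = "h" then (x.set i "th").set (i+1) "#"
      else x

def lexiconize (kata : String) : String :=
  let x0 := kata.toList.map (fun c => String.singleton c)   -- [c for c in kata]
  let x1 := (List.range x0.length).foldl lexBody x0         -- for i in range(len(x)): …
  let x2 := x1.filter (fun c => c ≠ "#")                    -- [c for c in x if c != '#']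
  PySem.Str.join " " x2                                     -- ' '.join(x)

-- ===== PORT B =====
def digraphTable : PySem.Dict (Char × Char) String :=
  PySem.Dict.ofList [(('n','y'), "ny"), (('n','g'), "ng"), (('s','y'), "sy"),
                     (('k','h'), "kh"), (('t','h'), "th")]

-- Source B's while loop over the index i: '(x[i], x[i+1]) in table' + 'table[…]' is one Dict.get?
def altGo : List Char → List String
  | [] => []
  | [a] => [String.singleton a]
  | a :: b :: rest =>
    match PySem.Dict.get? digraphTable (a, b) with
    | some t => t :: altGo rest
    | none => String.singleton a :: altGo (b :: rest)

def lexiconize_alt (kata : String) : String :=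
  PySem.Str.join " " (altGo kata.toList)

-- ===== PRECONDITION & SPEC =====
-- On inputs containing '#', A conflates it with its internal sentinel and silently deletes
-- every '#' from the output; B keeps '#' as an ordinary token, the intended behaviour.
def D_lexiconize (kata : String) : Prop := '#' ∈ kata.toList
instance (kata : String) : Decidable (D_lexiconize kata) := by unfold D_lexiconize; infer_instance

def Spec_lexiconize (kata : String) (out : String) : Prop := ¬ D_lexiconize kata → out = lexiconize_alt kata
instance (kata : String) (out : String) : Decidable (Spec_lexiconize kata out) := by unfold Spec_lexiconize; infer_instance

def pvDiffWitness_lexiconize : String := "a#"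
def pvDiffWitnessOut_lexiconize : String × String := ("a", "a #")

-- ===== CLAIM (what is proved, stated in full; the proofs are below) =====
def Claim_unchanged_lexiconize : Prop := ∀ (kata : String), Dom_lexiconize kata → Spec_lexiconize kata (lexiconize kata)
def Claim_changed_lexiconize : Prop := Dom_lexiconize (pvDiffWitness_lexiconize) ∧ D_lexiconize (pvDiffWitness_lexiconize) ∧ lexiconize (pvDiffWitness_lexiconize) = pvDiffWitnessOut_lexiconize.1 ∧ lexiconize_alt (pvDiffWitness_lexiconize) = pvDiffWitnessOut_lexiconize.2 ∧ pvDiffWitnessOut_lexiconize.1 ≠ pvDiffWitnessOut_lexiconize.2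
def Claim_exact_lexiconize : Prop := ∀ (kata : String), Dom_lexiconize kata → D_lexiconize kata → lexiconize kata ≠ lexiconize_alt kata

-- ===== LEMMAS AND PROOFS =====

-- A's list after the mutation loop, including the '#' sentinels
def stepRes : List Char → List String
  | [] => []
  | [a] => [String.singleton a]
  | a :: b :: rest =>
    match PySem.Dict.get? digraphTable (a, b) with
    | some t => t :: "#" :: stepRes rest
    | none => String.singleton a :: stepRes (b :: rest)

theorem tbl_eq : digraphTable = PySem.Dict.mk [(('n','y'), "ny"), (('n','g'), "ng"), (('s','y'), "sy"),
                     (('k','h'), "kh"), (('t','h'), "th")] := by decide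

theorem sing_eq (a c : Char) : (String.singleton a = String.singleton c) ↔ a = c := by
  constructor
  · intro h; have := congrArg String.toList h; simpa using this
  · intro h; rw [h]

theorem pyGet?_len (pre : List String) (y : String) (tail : List String) :
    PySem.List.pyGet? (pre ++ y :: tail) ((pre.length : Int)) = some y :=
  PySem.List.pyGet?_append_length pre tail y

theorem pyGet?_len1 (pre : List String) (a y : String) (tail : List String) :
    PySem.List.pyGet? (pre ++ a :: y :: tail) ((pre.length : Int) + 1) = some y := by
  have h1 : (pre.length : Int) + 1 = (((pre ++ [a]).length : Nat) : Int) := by simp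
  have h2 : pre ++ a :: y :: tail = (pre ++ [a]) ++ y :: tail := by simp
  rw [h1, h2]
  exact PySem.List.pyGet?_append_length (pre ++ [a]) tail y

theorem pyGet?_last_none (pre : List String) (a : String) :
    PySem.List.pyGet? (pre ++ [a]) ((pre.length : Int) + 1) = none := by
  have h1 : (pre.length : Int) + 1 = (((pre.length + 1 : Nat)) : Int) := by push_cast; ring
  rw [h1, PySem.List.pyGet?_natCast]
  simp

theorem body_eq (pre tail : List String) (a b : Char) :
    lexBody (pre ++ String.singleton a :: String.singleton b :: tail) pre.length
      = pre ++ (match PySem.Dict.get? digraphTable (a, b) with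
          | some t => t :: "#" :: tail
          | none => String.singleton a :: String.singleton b :: tail) := by
  unfold lexBody
  rw [pyGet?_len1, pyGet?_len, tbl_eq]
  simp only [show ("n" : String) = String.singleton 'n' from rfl,
             show ("y" : String) = String.singleton 'y' from rfl,
             show ("g" : String) = String.singleton 'g' from rfl,
             show ("s" : String) = String.singleton 's' from rfl,
             show ("k" : String) = String.singleton 'k' from rfl,
             show ("h" : String) = String.singleton 'h' from rfl,
             show ("t" : String) = String.singleton 't' from rfl,
             sing_eq]
  by_cases h1 : a = 'n' ∧ b = 'y'
  · obtain ⟨ha, hb⟩ := h1; subst ha hb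
    simp [PySem.Dict.get?_mk_cons]
  by_cases h2 : a = 'n' ∧ b = 'g'
  · obtain ⟨ha, hb⟩ := h2; subst ha hb
    simp [PySem.Dict.get?_mk_cons]
  by_cases h3 : a = 's' ∧ b = 'y'
  · obtain ⟨ha, hb⟩ := h3; subst ha hb
    simp [PySem.Dict.get?_mk_cons]
  by_cases h4 : a = 'k' ∧ b = 'h'
  · obtain ⟨ha, hb⟩ := h4; subst ha hb
    simp [PySem.Dict.get?_mk_cons]
  by_cases h5 : a = 't' ∧ b = 'h'
  · obtain ⟨ha, hb⟩ := h5; subst ha hb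
    simp [PySem.Dict.get?_mk_cons]
  · have e1 : ¬('n' = a ∧ 'y' = b) := fun ⟨x, y⟩ => h1 ⟨x.symm, y.symm⟩
    have e2 : ¬('n' = a ∧ 'g' = b) := fun ⟨x, y⟩ => h2 ⟨x.symm, y.symm⟩
    have e3 : ¬('s' = a ∧ 'y' = b) := fun ⟨x, y⟩ => h3 ⟨x.symm, y.symm⟩
    have e4 : ¬('k' = a ∧ 'h' = b) := fun ⟨x, y⟩ => h4 ⟨x.symm, y.symm⟩
    have e5 : ¬('t' = a ∧ 'h' = b) := fun ⟨x, y⟩ => h5 ⟨x.symm, y.symm⟩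
    simp [h1, h2, h3, h4, h5, e1, e2, e3, e4, e5, Prod.ext_iff, PySem.Dict.get?]

theorem body_last (pre : List String) (a : String) :
    lexBody (pre ++ [a]) pre.length = pre ++ [a] := by
  unfold lexBody
  rw [pyGet?_last_none]

theorem body_hash (pre tail : List String) :
    lexBody (pre ++ "#" :: tail) pre.length = pre ++ "#" :: tail := by
  cases tail with
  | nil => exact body_last pre "#"
  | cons y ys =>
    unfold lexBody
    rw [pyGet?_len1, pyGet?_len]
    simp

theorem loop_eq (cs : List Char) (pre : List String) :
    (List.range' pre.length cs.length).foldl lexBody (pre ++ cs.map (fun c => String.singleton c))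
      = pre ++ stepRes cs := by
  induction cs using stepRes.induct generalizing pre with
  | case1 => simp [stepRes]
  | case2 a =>
    simp only [List.map, List.length_cons, List.length_nil, Nat.zero_add]
    rw [List.range'_succ, List.range'_zero]
    simp only [List.foldl_cons, List.foldl_nil]
    rw [body_last pre (String.singleton a)]
    simp [stepRes]
  | case3 a b rest t hget ih =>
    simp only [List.map, List.length_cons]
    rw [show rest.length + 1 + 1 = rest.length + 2 from rfl]
    rw [List.range'_succ, List.range'_succ]
    simp only [List.foldl_cons]
    rw [body_eq pre _ a b, hget]
    rw [show (pre ++ (t :: "#" :: List.map (fun c => String.singleton c) rest) : List String)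
          = (pre ++ [t]) ++ "#" :: List.map (fun c => String.singleton c) rest from by simp]
    rw [show pre.length + 1 = (pre ++ [t]).length from by simp]
    rw [body_hash (pre ++ [t]) (List.map (fun c => String.singleton c) rest)]
    rw [show ((pre ++ [t]) ++ "#" :: List.map (fun c => String.singleton c) rest : List String)
          = (pre ++ [t, "#"]) ++ List.map (fun c => String.singleton c) rest from by simp]
    rw [show (pre ++ [t]).length + 1 = (pre ++ [t, "#"]).length from by simp]
    rw [ih (pre ++ [t, "#"])]
    simp [stepRes, hget]
  | case4 a b rest hget ih =>
    simp only [List.map, List.length_cons]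
    rw [show rest.length + 1 + 1 = rest.length + 1 + 1 from rfl]
    rw [List.range'_succ]
    simp only [List.foldl_cons]
    rw [body_eq pre _ a b, hget]
    rw [show (pre ++ (String.singleton a :: String.singleton b :: List.map (fun c => String.singleton c) rest) : List String)
          = (pre ++ [String.singleton a]) ++ List.map (fun c => String.singleton c) (b :: rest) from by simp]
    rw [show pre.length + 1 = (pre ++ [String.singleton a]).length from by simp]
    rw [show (rest.length + 1) = (b :: rest).length from by simp]
    rw [ih (pre ++ [String.singleton a])]
    simp [stepRes, hget]

theorem get?_ne_hash (a b : Char) (t : String) (h : PySem.Dict.get? digraphTable (a, b) = some t) :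
    t ≠ "#" := by
  rw [tbl_eq] at h
  simp only [PySem.Dict.get?_mk_cons] at h
  split_ifs at h
  all_goals first
    | (injection h with h2; subst h2; decide)
    | (exact absurd h (by simp [PySem.Dict.get?]))

theorem filter_stepRes (cs : List Char) (h : '#' ∉ cs) :
    (stepRes cs).filter (fun c => c ≠ "#") = altGo cs := by
  induction cs using stepRes.induct with
  | case1 => simp [stepRes, altGo]
  | case2 a =>
    have : a ≠ '#' := by intro hh; exact h (by simp [hh])
    simp [stepRes, altGo, sing_eq, show ("#" : String) = String.singleton '#' from rfl, this]
  | case3 a b rest t hget ih =>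
    have hr : '#' ∉ rest := fun hh => h (by simp [hh])
    have ih' := ih hr
    simp only [ne_eq, decide_not] at ih'
    simp only [stepRes, altGo, hget]
    rw [List.filter_cons, List.filter_cons]
    simp [get?_ne_hash a b t hget, ih']
  | case4 a b rest hget ih =>
    have ha : a ≠ '#' := by intro hh; exact h (by simp [hh])
    have hr : '#' ∉ b :: rest := fun hh => h (List.mem_cons_of_mem _ hh)
    have ih' := ih hr
    simp only [ne_eq, decide_not] at ih'
    have hcond : ¬(String.singleton a = "#") := by
      simpa [show ("#" : String) = String.singleton '#' from rfl, sing_eq] using ha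
    simp only [stepRes, altGo, hget]
    rw [List.filter_cons]
    simp [hcond, ih']

theorem get?_mem_tokens (a b : Char) (t : String) (h : PySem.Dict.get? digraphTable (a, b) = some t) :
    t = "ny" ∨ t = "ng" ∨ t = "sy" ∨ t = "kh" ∨ t = "th" := by
  rw [tbl_eq] at h
  simp only [PySem.Dict.get?_mk_cons] at h
  split_ifs at h
  all_goals first
    | (injection h with h2; subst h2; simp)
    | (exact absurd h (by simp [PySem.Dict.get?]))

theorem get?_keys_ne_hash (a b : Char) (t : String) (h : PySem.Dict.get? digraphTable (a, b) = some t) :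
    a ≠ '#' ∧ b ≠ '#' := by
  rw [tbl_eq] at h
  simp only [PySem.Dict.get?_mk_cons] at h
  split_ifs at h with h1 h2 h3 h4 h5
  · simp only [beq_iff_eq, Prod.mk.injEq] at h1
    obtain ⟨ha2, hb2⟩ := h1; subst ha2; subst hb2; exact ⟨by decide, by decide⟩
  · simp only [beq_iff_eq, Prod.mk.injEq] at h2
    obtain ⟨ha2, hb2⟩ := h2; subst ha2; subst hb2; exact ⟨by decide, by decide⟩
  · simp only [beq_iff_eq, Prod.mk.injEq] at h3
    obtain ⟨ha2, hb2⟩ := h3; subst ha2; subst hb2; exact ⟨by decide, by decide⟩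
  · simp only [beq_iff_eq, Prod.mk.injEq] at h4
    obtain ⟨ha2, hb2⟩ := h4; subst ha2; subst hb2; exact ⟨by decide, by decide⟩
  · simp only [beq_iff_eq, Prod.mk.injEq] at h5
    obtain ⟨ha2, hb2⟩ := h5; subst ha2; subst hb2; exact ⟨by decide, by decide⟩
  · exact absurd h (by simp [PySem.Dict.get?])

theorem mem_chars_join (sep : List Char) (parts : List (List Char)) (l : List Char) (c : Char)
    (hl : l ∈ parts) (hc : c ∈ l) : c ∈ PySem.Chars.join sep parts := by
  induction parts with
  | nil => cases hl
  | cons p rest ih =>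
    cases rest with
    | nil =>
      rw [List.mem_singleton] at hl
      subst hl
      rw [PySem.Chars.join_singleton]
      exact hc
    | cons q rest' =>
      rw [PySem.Chars.join_cons_cons]
      rw [List.mem_cons] at hl
      rcases hl with hl | hl
      · subst hl; simp [hc]
      · simp [ih hl]

theorem not_mem_chars_join (sep : List Char) (parts : List (List Char)) (c : Char)
    (hsep : c ∉ sep) (hparts : ∀ l ∈ parts, c ∉ l) : c ∉ PySem.Chars.join sep parts := by
  induction parts with
  | nil => simp [PySem.Chars.join_nil]
  | cons p rest ih =>
    cases rest with
    | nil =>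
      rw [PySem.Chars.join_singleton]
      exact hparts p (by simp)
    | cons q rest' =>
      rw [PySem.Chars.join_cons_cons]
      intro hmem
      rcases List.mem_append.1 hmem with hmem | hmem
      · rcases List.mem_append.1 hmem with hmem | hmem
        · exact hparts p (by simp) hmem
        · exact hsep hmem
      · exact ih (fun l hl => hparts l (List.mem_cons_of_mem _ hl)) hmem

theorem stepRes_elem (cs : List Char) (s : String) (hs : s ∈ stepRes cs) (hne : s ≠ "#") :
    '#' ∉ s.toList := by
  induction cs using stepRes.induct with
  | case1 => cases hs
  | case2 a =>
    rw [stepRes, List.mem_singleton] at hs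
    subst hs
    intro hmem
    simp only [String.toList_singleton, List.mem_singleton] at hmem
    exact hne (by rw [← hmem]; rfl)
  | case3 a b rest t hget ih =>
    rw [stepRes] at hs
    simp only [hget] at hs
    rw [List.mem_cons, List.mem_cons] at hs
    rcases hs with hs | hs | hs
    · rcases get?_mem_tokens a b t hget with h|h|h|h|h <;> rw [hs, h] <;> decide
    · exact absurd hs hne
    · exact ih hs
  | case4 a b rest hget ih =>
    rw [stepRes] at hs
    simp only [hget] at hs
    rw [List.mem_cons] at hs
    rcases hs with hs | hs
    · subst hs
      intro hmem
      simp only [String.toList_singleton, List.mem_singleton] at hmem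
      exact hne (by rw [← hmem]; rfl)
    · exact ih hs

theorem hash_mem_altGo (cs : List Char) (h : '#' ∈ cs) : "#" ∈ altGo cs := by
  induction cs using altGo.induct with
  | case1 => cases h
  | case2 a =>
    rw [List.mem_singleton] at h
    subst h
    simp [altGo, show ("#" : String) = String.singleton '#' from rfl]
  | case3 a b rest t hget ih =>
    obtain ⟨ha, hb⟩ := get?_keys_ne_hash a b t hget
    have hr : '#' ∈ rest := by
      rw [List.mem_cons, List.mem_cons] at h
      rcases h with h | h
      · exact absurd h.symm ha
      rcases h with h | h
      · exact absurd h.symm hb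
      · exact h
    simp only [altGo, hget]
    exact List.mem_cons_of_mem _ (ih hr)
  | case4 a b rest hget ih =>
    simp only [altGo, hget]
    by_cases ha : a = '#'
    · subst ha
      exact List.mem_cons_self ..
    · have hr : '#' ∈ b :: rest := by
        rw [List.mem_cons] at h
        rcases h with h | h
        · exact absurd h.symm ha
        · exact h
      exact List.mem_cons_of_mem _ (ih hr)

theorem lexiconize_eq_join (kata : String) :
    lexiconize kata = PySem.Str.join " " ((stepRes kata.toList).filter (fun c => c ≠ "#")) := by
  simp only [lexiconize]
  have hlen : (kata.toList.map (fun c => String.singleton c)).length = kata.toList.length := by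
    simp
  rw [hlen, List.range_eq_range']
  have := loop_eq kata.toList ([] : List String)
  simp only [List.nil_append, List.length_nil] at this
  rw [this]

-- ===== VERDICT (by name: the statement is the Claim_ definition above) =====
theorem lexiconize_spec : Claim_unchanged_lexiconize := by
  intro kata _ hD
  show lexiconize kata = lexiconize_alt kata
  rw [lexiconize_eq_join, filter_stepRes kata.toList hD]
  rfl

theorem lexiconize_changed : Claim_changed_lexiconize := by
  unfold Claim_changed_lexiconize; decide

theorem lexiconize_tight : Claim_exact_lexiconize := by
  intro kata _ hD hEq
  have hA : '#' ∉ (lexiconize kata).toList := by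
    rw [lexiconize_eq_join, PySem.Str.toList_join]
    apply not_mem_chars_join
    · decide
    · intro l hl
      rw [List.mem_map] at hl
      obtain ⟨s, hs, rfl⟩ := hl
      rw [List.mem_filter] at hs
      exact stepRes_elem kata.toList s hs.1 (by simpa using hs.2)
  have hB : '#' ∈ (lexiconize_alt kata).toList := by
    simp only [lexiconize_alt]
    rw [PySem.Str.toList_join]
    exact mem_chars_join _ _ "#".toList '#'
      (List.mem_map_of_mem (hash_mem_altGo kata.toList hD)) (by decide)
  rw [hEq] at hA
  exact hA hB
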